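-- pv_equiv track=rewrite | github.com/jorgefandinno/bibliography | bibfmt.py | _new_id
-- ===== SOURCE A (Python) =====
-- import string
-- import itertools
--
-- def _new_id(id_base, year, existing_ids=set()):
--     '''
--     Generate a new id.
--     '''
--     if len(year) > 2:
--         year = year[-2:]
--     for size in itertools.count(1):
--         for suffix in itertools.product(string.ascii_lowercase, repeat=size):
--             new_id = id_base + year + "".join(suffix)
--             if new_id not in existing_ids:
--                 return new_id
-- ===== SOURCE B (Python) =====
-- def _new_id(id_base, year, existing_ids=set()):
--     '''
--     Generate a new id.
--     '''
--     if len(year) > 2: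
--         year = year[-2:]
--     base = id_base + year
--     n = 1
--     while True:
--         m = n
--         suffix = ''
--         while m > 0:
--             m -= 1
--             suffix = chr(ord('a') + m % 26) + suffix
--             m //= 26
--         new_id = base + suffix
--         if new_id not in existing_ids:
--             return new_id
--         n += 1
-- ===== Notes on version B (the rewrite author's own statement) =====
-- stated objective: alternative
-- what changed: Replaces the nested itertools.count/itertools.product enumeration of letter suffixes by a single integer counter decoded into a bijective base-26 letter suffix, so the inner cartesian-product generation disappears.
import Mathlib
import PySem

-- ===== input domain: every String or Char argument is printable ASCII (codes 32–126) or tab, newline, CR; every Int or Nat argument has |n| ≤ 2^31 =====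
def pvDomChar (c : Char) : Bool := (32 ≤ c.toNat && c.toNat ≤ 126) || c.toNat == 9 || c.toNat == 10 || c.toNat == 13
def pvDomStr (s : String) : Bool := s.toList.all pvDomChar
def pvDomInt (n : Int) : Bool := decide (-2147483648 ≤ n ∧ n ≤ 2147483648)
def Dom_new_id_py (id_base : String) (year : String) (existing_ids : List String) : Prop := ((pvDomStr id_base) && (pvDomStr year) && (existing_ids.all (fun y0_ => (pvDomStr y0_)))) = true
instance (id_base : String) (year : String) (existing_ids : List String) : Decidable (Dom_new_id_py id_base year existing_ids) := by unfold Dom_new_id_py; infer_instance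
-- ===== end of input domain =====

-- B replaces A's nested size/itertools.product suffix enumeration by a single integer
-- counter decoded in bijective base 26 (same candidate order); proved to return the same id.
-- Fuel note: both Python loops always terminate (at most len(existing_ids)+1 candidates of a
-- given shape can be taken); the ports bound the searches by existing_ids.length + 1 (sizes
-- resp. counter steps), which the proof shows is always enough — the "" fallback is unreachable.

-- ===== PORT A =====
-- itertools.product(string.ascii_lowercase, repeat=size), in product order
def pvProdA : Nat → List (List Char)
  | 0 => [[]]
  | s + 1 => ("abcdefghijklmnopqrstuvwxyz".toList).flatMap (fun c => (pvProdA s).map (fun r => c :: r))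

-- the inner 'for suffix in product(...)' loop: first candidate not in existing_ids
def pvFirstA (ex : List String) (pre : List Char) : List (List Char) → Option String
  | [] => none
  | sfx :: rest =>
      let new_id := String.ofList (pre ++ sfx)     -- id_base + year + "".join(suffix)
      if ex.contains new_id then pvFirstA ex pre rest else some new_id

-- the outer 'for size in itertools.count(1)' loop, fueled
def pvLoopA (ex : List String) (pre : List Char) : Nat → Nat → String
  | 0, _ => ""
  | fuel + 1, size =>
      match pvFirstA ex pre (pvProdA size) with
      | some s => s
      | none => pvLoopA ex pre fuel (size + 1)

def new_id_py (id_base : String) (year : String) (existing_ids : List String) : String :=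
  let year := if PySem.Str.len year > 2 then PySem.Str.slice year (some (-2)) none else year
  pvLoopA existing_ids (id_base.toList ++ year.toList) (existing_ids.length + 1) 1

-- ===== PORT B =====
-- inner 'while m > 0' loop of Source B: bijective base-26 suffix, digits prepended
-- (Source B's m //= 26 and m % 26 act on a nonnegative int, where Nat division/mod are exact)
def pvSfxB : Nat → List Char → List Char
  | 0, acc => acc
  | m + 1, acc => pvSfxB (m / 26) (Char.ofNat (97 + m % 26) :: acc)
  decreasing_by exact Nat.lt_succ_of_le (Nat.div_le_self m 26)

-- outer 'while True' counter loop of Source B, fueled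
def pvLoopB (ex : List String) (pre : List Char) : Nat → Nat → String
  | 0, _ => ""
  | fuel + 1, n =>
      let new_id := String.ofList (pre ++ pvSfxB n [])
      if ex.contains new_id then pvLoopB ex pre fuel (n + 1) else new_id

def new_id_py_alt (id_base : String) (year : String) (existing_ids : List String) : String :=
  let year := if PySem.Str.len year > 2 then PySem.Str.slice year (some (-2)) none else year
  pvLoopB existing_ids (id_base.toList ++ year.toList) (existing_ids.length + 1) 1

-- ===== PRECONDITION & SPEC =====
def Spec_new_id_py (id_base : String) (year : String) (existing_ids : List String) (out : String) : Prop := out = new_id_py_alt id_base year existing_ids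
instance (id_base : String) (year : String) (existing_ids : List String) (out : String) : Decidable (Spec_new_id_py id_base year existing_ids out) := by unfold Spec_new_id_py; infer_instance

-- ===== CLAIM (what is proved, stated in full; the proofs are below) =====
def Claim_equal_new_id_py : Prop := ∀ (id_base : String) (year : String) (existing_ids : List String), Dom_new_id_py id_base year existing_ids → Spec_new_id_py id_base year existing_ids (new_id_py id_base year existing_ids)

-- ===== LEMMAS AND PROOFS =====

-- bijective base-26 numeral of n (append form): bij 1 = "a", bij 26 = "z", bij 27 = "aa", …
def pvBij : Nat → List Char
  | 0 => []
  | m + 1 => pvBij (m / 26) ++ [Char.ofNat (97 + m % 26)]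
  decreasing_by exact Nat.lt_succ_of_le (Nat.div_le_self m 26)

def pvLetters : List Char := (List.range 26).map (fun r => Char.ofNat (97 + r))

-- suffixes of length s, generated last-digit-fastest
def pvAlt : Nat → List (List Char)
  | 0 => [[]]
  | s + 1 => (pvAlt s).flatMap (fun r => pvLetters.map (fun d => r ++ [d]))

-- 0, 1, 27, 703, … : index of the first suffix of each length in the bij enumeration
def pvBase : Nat → Nat
  | 0 => 0
  | s + 1 => 26 * pvBase s + 1

-- linear search over a list of counter values
def pvFirst (ex : List String) (pre : List Char) : List Nat → Option String
  | [] => none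
  | n :: t =>
      let c := String.ofList (pre ++ pvBij n)
      if ex.contains c then pvFirst ex pre t else some c

theorem pvBij_succ (m : Nat) : pvBij (m + 1) = pvBij (m / 26) ++ [Char.ofNat (97 + m % 26)] := by
  rw [pvBij]

theorem pvSfxB_eq (n : Nat) : ∀ acc, pvSfxB n acc = pvBij n ++ acc := by
  induction n using Nat.strong_induction_on with
  | _ n ih =>
    intro acc
    match n with
    | 0 => simp [pvSfxB, pvBij]
    | m + 1 =>
      rw [pvSfxB, ih (m / 26) (Nat.lt_succ_of_le (Nat.div_le_self m 26)), pvBij_succ,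
        List.append_assoc]
      rfl

theorem pvLetters_eq : "abcdefghijklmnopqrstuvwxyz".toList = pvLetters := by decide

theorem pvPrepend_alt : ∀ s, pvLetters.flatMap (fun c => (pvAlt s).map (fun r => c :: r)) = pvAlt (s + 1) := by
  intro s
  induction s with
  | zero =>
    show pvLetters.flatMap (fun c => [[c]]) = pvAlt 1
    rw [← List.map_eq_flatMap]
    simp [pvAlt]
  | succ s ih =>
    conv_rhs => rw [pvAlt, ← ih]
    rw [show pvAlt (s + 1) = (pvAlt s).flatMap (fun r => pvLetters.map (fun d => r ++ [d])) from rfl]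
    simp [List.map_flatMap, List.flatMap_assoc, List.flatMap_map, List.map_map, Function.comp_def]

theorem pvProdA_eq_alt : ∀ s, pvProdA s = pvAlt s := by
  intro s
  induction s with
  | zero => rfl
  | succ s ih => rw [pvProdA, pvLetters_eq, ih, pvPrepend_alt]

theorem pvChar_toNat (n : Nat) (h : n < 26) : (Char.ofNat (97 + n)).toNat = 97 + n := by
  have hv : (97 + n).isValidChar := Or.inl (by omega)
  simp [Char.ofNat, hv, Char.ofNatAux]
  omega

theorem pvMapBijBlock (m : Nat) :
    (List.range' (26 * m + 1) 26).map pvBij = pvLetters.map (fun d => pvBij m ++ [d]) := by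
  rw [List.range'_eq_map_range, pvLetters, List.map_map, List.map_map]
  apply List.map_eq_map_iff.mpr
  intro r hr
  have hr26 : r < 26 := List.mem_range.mp hr
  have : 26 * m + 1 + r = (26 * m + r) + 1 := by omega
  simp only [Function.comp_apply, this, pvBij_succ]
  have h1 : (26 * m + r) / 26 = m := by omega
  have h2 : (26 * m + r) % 26 = r := by omega
  rw [h1, h2]

theorem pvRangeChunk : ∀ k m, List.range' (26 * m + 1) (26 * k) =
    (List.range' m k).flatMap (fun t => List.range' (26 * t + 1) 26) := by
  intro k
  induction k with
  | zero => simp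
  | succ k ih =>
    intro m
    conv_lhs => rw [show 26 * (k + 1) = 26 + 26 * k by ring]
    rw [← List.range'_append_1]
    conv_rhs => rw [List.range'_succ]
    rw [List.flatMap_cons, show 26 * m + 1 + 26 = 26 * (m + 1) + 1 by ring, ih (m + 1)]

theorem pvMapBijRange : ∀ s q, (List.range' (q * 26 ^ s + pvBase s) (26 ^ s)).map pvBij =
    (pvAlt s).map (fun r => pvBij q ++ r) := by
  intro s
  induction s with
  | zero => intro q; simp [pvBase, pvAlt, List.range'_one]
  | succ s ih =>
    intro q
    have hb : pvBase (s + 1) = 26 * pvBase s + 1 := rfl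
    have hN : q * 26 ^ (s + 1) + pvBase (s + 1) = 26 * (q * 26 ^ s + pvBase s) + 1 := by
      rw [hb, pow_succ]; ring
    have hP : (26 : Nat) ^ (s + 1) = 26 * 26 ^ s := by rw [pow_succ]; ring
    rw [hN, hP, pvRangeChunk, List.map_flatMap]
    simp only [pvMapBijBlock]
    have : ∀ (l : List Nat),
        l.flatMap (fun t => pvLetters.map (fun d => pvBij t ++ [d])) =
        (l.map pvBij).flatMap (fun x => pvLetters.map (fun d => x ++ [d])) := by
      intro l; rw [List.flatMap_map]
    rw [this, ih q]
    rw [show pvAlt (s + 1) = (pvAlt s).flatMap (fun r => pvLetters.map (fun d => r ++ [d])) from rfl]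
    simp [List.flatMap_map, List.map_flatMap, List.map_map, Function.comp_def, List.append_assoc]

theorem pvAlt_eq_range (s : Nat) : (List.range' (pvBase s) (26 ^ s)).map pvBij = pvAlt s := by
  have := pvMapBijRange s 0
  simpa [pvBij] using this

theorem pvFirstA_eq (ex : List String) (pre : List Char) :
    ∀ l : List Nat, pvFirstA ex pre (l.map pvBij) = pvFirst ex pre l := by
  intro l
  induction l with
  | nil => rfl
  | cons n t ih => simp only [List.map_cons, pvFirstA, pvFirst, ih]

theorem pvFirst_append (ex : List String) (pre : List Char) :
    ∀ l₁ l₂, pvFirst ex pre (l₁ ++ l₂) = (pvFirst ex pre l₁).or (pvFirst ex pre l₂) := by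
  intro l₁ l₂
  induction l₁ with
  | nil => rfl
  | cons n t ih =>
    simp only [List.cons_append, pvFirst, ih]
    split <;> simp

theorem pvLoopB_eq (ex : List String) (pre : List Char) :
    ∀ fuel n, pvLoopB ex pre fuel n = (pvFirst ex pre (List.range' n fuel)).getD "" := by
  intro fuel
  induction fuel with
  | zero => intro n; rfl
  | succ fuel ih =>
    intro n
    rw [List.range'_succ]
    simp only [pvLoopB, pvFirst, pvSfxB_eq, List.append_nil, ih]
    split <;> simp

theorem pvBase_formula : ∀ s, 25 * pvBase s + 1 = 26 ^ s := by
  intro s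
  induction s with
  | zero => rfl
  | succ s ih => rw [show pvBase (s + 1) = 26 * pvBase s + 1 from rfl, pow_succ, ← ih]; ring

theorem pvBase_add (s : Nat) : pvBase s + 26 ^ s = pvBase (s + 1) := by
  have h := pvBase_formula s
  have : pvBase (s + 1) = 26 * pvBase s + 1 := rfl
  omega

theorem pvBase_mono : ∀ t u, pvBase t ≤ pvBase (t + u) := by
  intro t u
  induction u with
  | zero => simp
  | succ u ih =>
    have h2 : pvBase (t + (u + 1)) = 26 * pvBase (t + u) + 1 := rfl
    omega

theorem pvLe_base : ∀ s, s ≤ pvBase s := by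
  intro s
  induction s with
  | zero => simp [pvBase]
  | succ s ih =>
    have : pvBase (s + 1) = 26 * pvBase s + 1 := rfl
    omega

theorem pvLoopA_eq (ex : List String) (pre : List Char) :
    ∀ fuel s, pvLoopA ex pre fuel s =
      (pvFirst ex pre (List.range' (pvBase s) (pvBase (s + fuel) - pvBase s))).getD "" := by
  intro fuel
  induction fuel with
  | zero => intro s; simp [pvLoopA, pvFirst]
  | succ fuel ih =>
    intro s
    have hmono := pvBase_mono (s + 1) fuel
    have hadd := pvBase_add s
    have hsplit : List.range' (pvBase s) (pvBase (s + (fuel + 1)) - pvBase s) =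
        List.range' (pvBase s) (26 ^ s) ++
        List.range' (pvBase (s + 1)) (pvBase (s + 1 + fuel) - pvBase (s + 1)) := by
      have hmono' : pvBase s + 26 ^ s ≤ pvBase (s + 1 + fuel) := by rw [hadd]; exact hmono
      conv_rhs => rw [← hadd]
      rw [List.range'_append_1]
      congr 1
      rw [show s + (fuel + 1) = s + 1 + fuel by omega]
      generalize 26 ^ s = X at hmono' ⊢
      omega
    rw [pvLoopA, hsplit, pvFirst_append]
    rw [show pvProdA s = (List.range' (pvBase s) (26 ^ s)).map pvBij by
      rw [pvProdA_eq_alt, pvAlt_eq_range]]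
    rw [pvFirstA_eq]
    cases h : pvFirst ex pre (List.range' (pvBase s) (26 ^ s)) with
    | none => simp [ih (s + 1)]
    | some c => simp

-- decoder: left inverse of pvBij, used for injectivity
def pvDec (l : List Char) : Nat := l.foldl (fun a c => 26 * a + (c.toNat - 96)) 0

theorem pvDec_bij : ∀ n, pvDec (pvBij n) = n := by
  intro n
  induction n using Nat.strong_induction_on with
  | _ n ih =>
    match n with
    | 0 => simp [pvDec, show pvBij 0 = [] from by rw [pvBij]]
    | m + 1 =>
      rw [pvBij_succ]
      have hlt : m % 26 < 26 := Nat.mod_lt _ (by omega)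
      have hch : (Char.ofNat (97 + m % 26)).toNat = 97 + m % 26 := pvChar_toNat _ hlt
      simp only [pvDec, List.foldl_append, List.foldl_cons, List.foldl_nil]
      have : (pvBij (m / 26)).foldl (fun a c => 26 * a + (c.toNat - 96)) 0 = m / 26 :=
        ih (m / 26) (Nat.lt_succ_of_le (Nat.div_le_self m 26))
      rw [this, hch]
      omega

theorem pvBij_inj : Function.Injective pvBij := by
  intro a b h
  have := congrArg pvDec h
  rwa [pvDec_bij, pvDec_bij] at this

theorem pvCand_inj (pre : List Char) :
    Function.Injective (fun n => String.ofList (pre ++ pvBij n)) := by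
  intro a b h
  have h2 : pre ++ pvBij a = pre ++ pvBij b := by
    have := congrArg String.toList h
    simpa using this
  exact pvBij_inj (List.append_cancel_left h2)

theorem pvNodup_subset_length {l m : List String} (h : l.Nodup) (hs : l ⊆ m) :
    l.length ≤ m.length := by
  calc l.length = l.toFinset.card := (List.toFinset_card_of_nodup h).symm
    _ ≤ m.toFinset.card := Finset.card_le_card (by
        intro x hx; simp only [List.mem_toFinset] at *; exact hs hx)
    _ ≤ m.length := m.toFinset_card_le

theorem pvExists_free (ex : List String) (pre : List Char) :
    ∃ n ∈ List.range' 1 (ex.length + 1),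
      ex.contains (String.ofList (pre ++ pvBij n)) = false := by
  by_contra hcon
  push Not at hcon
  have hall : ∀ n ∈ List.range' 1 (ex.length + 1),
      String.ofList (pre ++ pvBij n) ∈ ex := by
    intro n hn
    have := hcon n hn
    have : ex.contains (String.ofList (pre ++ pvBij n)) = true := by
      cases hb : ex.contains (String.ofList (pre ++ pvBij n)) with
      | false => exact absurd hb this
      | true => rfl
    exact List.contains_iff_mem.mp this
  set M := (List.range' 1 (ex.length + 1)).map (fun n => String.ofList (pre ++ pvBij n)) with hM
  have hsub : M ⊆ ex := by
    intro x hx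
    rw [hM, List.mem_map] at hx
    obtain ⟨n, hn, rfl⟩ := hx
    exact hall n hn
  have hnd : M.Nodup := List.Nodup.map (pvCand_inj pre) List.nodup_range'
  have hlen : M.length = ex.length + 1 := by simp [hM]
  have := pvNodup_subset_length hnd hsub
  omega

theorem pvFirst_isSome (ex : List String) (pre : List Char) :
    ∀ l : List Nat, (∃ n ∈ l, ex.contains (String.ofList (pre ++ pvBij n)) = false) →
      (pvFirst ex pre l).isSome := by
  intro l
  induction l with
  | nil => rintro ⟨n, hn, -⟩; cases hn
  | cons m t ih =>
    rintro ⟨n, hn, hfree⟩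
    simp only [pvFirst]
    split
    · rename_i hc
      rcases List.mem_cons.mp hn with rfl | hn'
      · rw [hfree] at hc; cases hc
      · exact ih ⟨n, hn', hfree⟩
    · simp

-- ===== VERDICT (by name: the statement is the Claim_ definition above) =====
theorem new_id_py_spec : Claim_equal_new_id_py := by
  intro id_base year existing_ids _
  unfold Spec_new_id_py new_id_py new_id_py_alt
  set pre := id_base.toList ++ (if PySem.Str.len year > 2 then PySem.Str.slice year (some (-2)) none else year).toList with hpre
  set L := existing_ids.length with hL
  rw [pvLoopA_eq, pvLoopB_eq]
  have hbase1 : pvBase 1 = 1 := rfl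
  -- the first L+1 counters contain a free candidate
  obtain ⟨n, hn, hfree⟩ := pvExists_free existing_ids pre
  have hsome := pvFirst_isSome existing_ids pre (List.range' 1 (L + 1)) ⟨n, hn, hfree⟩
  obtain ⟨c, hc⟩ := Option.isSome_iff_exists.mp hsome
  -- A's search range extends B's
  have hlong : L + 1 ≤ pvBase (1 + (L + 1)) - pvBase 1 := by
    have h1 := pvLe_base (1 + (L + 1))
    have : pvBase 1 = 1 := rfl
    omega
  have hsplitA : List.range' (pvBase 1) (pvBase (1 + (L + 1)) - pvBase 1) =
      List.range' 1 (L + 1) ++ List.range' (1 + (L + 1)) (pvBase (1 + (L + 1)) - pvBase 1 - (L + 1)) := by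
    rw [hbase1, List.range'_append_1]
    congr 1
    omega
  rw [hsplitA, pvFirst_append, hc]
  simp
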